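-- pv_equiv track=rewrite | github.com/nicc-xiaoying-wang/PythonTU | ex_06.py | simple_tokenizer
-- ===== SOURCE A (Python) =====
-- def simple_tokenizer(th_dict, sentence):
--     """
--     Simple tokenizer, transliterator, part-of-speech tagger and glosser
--     that correctly analyses the example text based on the dictionary data.
--
--     :param th_dict: Thai dictionary
--     :type th_dict: dict
--     :param sentence: Thai sentence
--     :type sentence: str
--     :return: list of tuples of format
--     (Thai token, transliteration, POS, English glosses)
--     :rtype: list[tuple(str, str, str, str)]
--     """
--     token_list =[]
--     position = 0
--     length = len(sentence)
--
--     while position < length: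
--         found = False
--         for word_length in range (1, length-position + 1):
--             thai_word = sentence[position:position+word_length]
--             if thai_word in th_dict:
--                 translation, category, english_glosses = th_dict[thai_word]
--                 token_list.append((thai_word, translation, category, english_glosses))
--                 position += word_length
--                 found = True
--                 break
--
--         if not found:
--             position += 1
--     return token_list
-- ===== SOURCE B (Python) =====
-- def simple_tokenizer(th_dict, sentence):
--     # Scan the dictionary entries (sorted once by key length) for the first,
--     # i.e. shortest, key matching at the current position, instead of probing
--     # every substring length.  A shortest matching key is unique, so this is
--     # exactly A's shortest-match tokenization.
--     by_len = sorted(th_dict.items(), key=lambda kv: len(kv[0]))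
--     tokens = []
--     pos = 0
--     n = len(sentence)
--     while pos < n:
--         for word, entry in by_len:
--             if word and sentence.startswith(word, pos):
--                 tokens.append((word, *entry))
--                 pos += len(word)
--                 break
--         else:
--             pos += 1
--     return tokens
-- ===== Notes on version B (the rewrite author's own statement) =====
-- stated objective: alternative
-- what changed: B replaces A's scan over all substring lengths at each position by a single pre-sorted (by key length) pass over the dictionary entries, taking the first key that matches at the position via startswith; the shortest matching key is unique, so this is the same shortest-match tokenization.
import Mathlib
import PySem

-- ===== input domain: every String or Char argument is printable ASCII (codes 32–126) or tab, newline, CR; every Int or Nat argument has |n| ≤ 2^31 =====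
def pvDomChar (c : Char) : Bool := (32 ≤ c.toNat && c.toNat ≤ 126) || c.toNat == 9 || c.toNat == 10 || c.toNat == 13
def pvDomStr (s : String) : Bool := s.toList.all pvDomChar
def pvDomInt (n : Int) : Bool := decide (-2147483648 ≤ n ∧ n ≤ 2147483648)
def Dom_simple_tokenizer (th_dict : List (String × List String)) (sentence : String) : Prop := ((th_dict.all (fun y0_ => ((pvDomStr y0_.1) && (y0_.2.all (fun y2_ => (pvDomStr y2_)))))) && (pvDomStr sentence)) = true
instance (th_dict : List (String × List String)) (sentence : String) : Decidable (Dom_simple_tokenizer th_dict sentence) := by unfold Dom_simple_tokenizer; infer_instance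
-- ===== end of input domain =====

-- B replaces A's per-position scan over all substring lengths by a single pass, at each position,
-- over the dictionary entries pre-sorted by key length, taking the first key that matches there
-- (the shortest matching key is unique); objective: a genuinely different traversal, not speed.

-- ===== PORT A =====
-- Both ports key the Python dict by the string's code points (List Char); string equality agrees
-- with code-point-list equality, and PySem.Dict.ofList is exact for building a Python dict from pairs.

-- 'translation, category, english_glosses = th_dict[thai_word]; token_list.append((thai_word, ...))':
-- the token appended on a hit; Python raises ValueError unless the value is a 3-list
-- (excluded by Pre_), so the [] arm is unreachable on Pre_.
def pvTokenA (w : List Char) (v : List String) : List (List String) :=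
  match v with
  | [t, c, g] => [[String.ofList w, t, c, g]]
  | _ => []

-- inner 'for word_length in range(1, length-position+1): ... break' of A, over the list of candidate lengths
def pvScanA (d : PySem.Dict (List Char) (List String)) (s : List Char) (pos : Nat) :
    List Nat → Option (Nat × List Char × List String)
  | [] => none
  | wl :: rest =>
    let w := (s.drop pos).take wl       -- sentence[position:position+word_length]
    match d.get? w with
    | some v => some (wl, w, v)
    | none => pvScanA d s pos rest

theorem pvScanA_mem (d : PySem.Dict (List Char) (List String)) (s : List Char) (pos : Nat) :
    ∀ (ws : List Nat) (wl : Nat) (w : List Char) (v : List String),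
      pvScanA d s pos ws = some (wl, w, v) → wl ∈ ws := by
  intro ws
  induction ws with
  | nil => intro wl w v h; simp [pvScanA] at h
  | cons a rest ih =>
    intro wl w v h
    simp only [pvScanA] at h
    rcases hg : d.get? ((s.drop pos).take a) with _ | v'
    · rw [hg] at h
      exact List.mem_cons_of_mem a (ih wl w v h)
    · rw [hg] at h
      cases h
      exact List.mem_cons_self

-- A's outer while-loop; `acc` is token_list
def pvLoopA (d : PySem.Dict (List Char) (List String)) (s : List Char) (pos : Nat)
    (acc : List (List String)) : List (List String) :=
  if _h : pos < s.length then
    match hs : pvScanA d s pos (List.range' 1 (s.length - pos)) with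
    | some (wl, w, v) => pvLoopA d s (pos + wl) (acc ++ pvTokenA w v)
    | none => pvLoopA d s (pos + 1) acc
  else acc
termination_by s.length - pos
decreasing_by
  · have h1 := pvScanA_mem d s pos _ _ _ _ hs
    have := (List.mem_range'_1.mp h1).1
    omega
  · omega

def simple_tokenizer (th_dict : List (String × List String)) (sentence : String) : List (List String) :=
  pvLoopA (PySem.Dict.ofList (th_dict.map (fun p => (p.1.toList, p.2)))) sentence.toList 0 []

-- ===== PORT B =====
-- 'word and sentence.startswith(word, pos)': for 0 ≤ pos ≤ len(sentence) (always the case here)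
-- Python's startswith with a start offset is exactly 'word is a prefix of the suffix at pos'.
def pvMatchB (s : List Char) (pos : Nat) (w : List Char) : Bool :=
  !w.isEmpty && w.isPrefixOf (s.drop pos)

-- inner 'for word, entry in by_len: … break' of B over the length-sorted entry list
def pvScanB (s : List Char) (pos : Nat) :
    List (List Char × List String) → Option (List Char × List String)
  | [] => none
  | (w, v) :: rest => if pvMatchB s pos w then some (w, v) else pvScanB s pos rest

theorem pvScanB_match (s : List Char) (pos : Nat) :
    ∀ (l : List (List Char × List String)) (w : List Char) (v : List String),
      pvScanB s pos l = some (w, v) → pvMatchB s pos w = true := by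
  intro l
  induction l with
  | nil => intro w v h; simp [pvScanB] at h
  | cons e rest ih =>
    intro w v h
    obtain ⟨we, ve⟩ := e
    simp only [pvScanB] at h
    by_cases hm : pvMatchB s pos we = true
    · rw [if_pos hm] at h; cases h; exact hm
    · rw [if_neg hm] at h; exact ih w v h

-- B's while-loop, building the token list front to back; 'tokens.append((word, *entry))'
def pvLoopB (byLen : List (List Char × List String)) (s : List Char) (pos : Nat) :
    List (List String) :=
  if _h : pos < s.length then
    match hs : pvScanB s pos byLen with
    | some (w, v) => (String.ofList w :: v) :: pvLoopB byLen s (pos + w.length)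
    | none => pvLoopB byLen s (pos + 1)
  else []
termination_by s.length - pos
decreasing_by
  · have hm := pvScanB_match s pos byLen _ _ hs
    have : w ≠ [] := by
      simp only [pvMatchB, Bool.and_eq_true, Bool.not_eq_true'] at hm
      simpa [List.isEmpty_iff] using hm.1
    have : 0 < w.length := List.length_pos_iff.mpr this
    omega
  · omega

def simple_tokenizer_alt (th_dict : List (String × List String)) (sentence : String) : List (List String) :=
  let d := PySem.Dict.ofList (th_dict.map (fun p => (p.1.toList, p.2)))
  -- by_len = sorted(th_dict.items(), key=lambda kv: len(kv[0]))
  let byLen := PySem.List.sorted d.items (fun kv => kv.1.length) false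
  pvLoopB byLen sentence.toList 0

-- ===== PRECONDITION & SPEC =====
-- Pre_ excludes inputs where a dictionary value that is not a 3-element list belongs to a nonempty key
-- that is, at some sentence position, a match not shadowed by any shorter dictionary match: when A's
-- scan reaches such a position the unpacking 'translation, category, english_glosses =
-- th_dict[thai_word]' raises ValueError (if every such position is skipped over, A returns normally;
-- those inputs are also excluded).
def Pre_simple_tokenizer (th_dict : List (String × List String)) (sentence : String) : Prop :=
  ∀ p ∈ th_dict, p.1.toList ≠ [] → p.2.length ≠ 3 →
    ∀ j ∈ List.range sentence.toList.length,
      p.1.toList <+: sentence.toList.drop j →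
      ∃ q ∈ th_dict, q.1.toList ≠ [] ∧ q.1.toList.length < p.1.toList.length ∧
        q.1.toList <+: sentence.toList.drop j
instance (th_dict : List (String × List String)) (sentence : String) : Decidable (Pre_simple_tokenizer th_dict sentence) := by unfold Pre_simple_tokenizer; infer_instance

def pvWitness_simple_tokenizer : (List (String × List String)) × String :=
  ([("a", ["t", "p", "g"]), ("bc", ["u", "q", "h"])], "abcd")

def Spec_simple_tokenizer (th_dict : List (String × List String)) (sentence : String) (out : List (List String)) : Prop := out = simple_tokenizer_alt th_dict sentence
instance (th_dict : List (String × List String)) (sentence : String) (out : List (List String)) : Decidable (Spec_simple_tokenizer th_dict sentence out) := by unfold Spec_simple_tokenizer; infer_instance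

-- ===== CLAIM (what is proved, stated in full; the proofs are below) =====
def Claim_equal_simple_tokenizer : Prop := ∀ (th_dict : List (String × List String)) (sentence : String), Dom_simple_tokenizer th_dict sentence → Pre_simple_tokenizer th_dict sentence → Spec_simple_tokenizer th_dict sentence (simple_tokenizer th_dict sentence)

-- ===== LEMMAS AND PROOFS =====

-- the items of a dict built from a pair list all come from that list
theorem pv_items_update_subset {κ ν : Type} [BEq κ] (ps : List (κ × ν)) :
    ∀ (d : PySem.Dict κ ν), (d.update ps).items ⊆ d.items ++ ps := by
  induction ps with
  | nil => intro d; simp [PySem.Dict.update]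
  | cons q rest ih =>
    intro d p hp
    have h1 : (d.update (q :: rest)) = ((d.insert q.1 q.2).update rest) := by
      simp [PySem.Dict.update]
    rw [h1] at hp
    have h2 := ih (d.insert q.1 q.2) hp
    rcases List.mem_append.mp h2 with h3 | h3
    · by_cases hc : (d.contains q.1) = true
      · simp only [PySem.Dict.insert, hc, if_true] at h3
        rcases List.mem_map.mp h3 with ⟨p', hp', heq⟩
        by_cases hb : (p'.1 == q.1) = true
        · simp only [hb, if_true] at heq
          subst heq
          exact List.mem_append.mpr (Or.inr (by simp))
        · simp only [hb] at heq
          subst heq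
          exact List.mem_append.mpr (Or.inl hp')
      · simp only [PySem.Dict.insert, hc] at h3
        rcases List.mem_append.mp h3 with h4 | h4
        · exact List.mem_append.mpr (Or.inl h4)
        · simp at h4
          subst h4
          exact List.mem_append.mpr (Or.inr (by simp))
    · exact List.mem_append.mpr (Or.inr (List.mem_cons_of_mem q h3))

theorem pv_items_ofList_subset {κ ν : Type} [BEq κ] (ps : List (κ × ν)) :
    (PySem.Dict.ofList ps).items ⊆ ps := by
  have h := pv_items_update_subset ps PySem.Dict.empty
  simpa [PySem.Dict.empty] using h

-- the first match of B's entry scan: the list splits at it, everything before fails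
theorem pvScanB_split (s : List Char) (pos : Nat) :
    ∀ (l : List (List Char × List String)) (w : List Char) (v : List String),
      pvScanB s pos l = some (w, v) →
      ∃ pre post, l = pre ++ (w, v) :: post ∧ ∀ x ∈ pre, pvMatchB s pos x.1 = false := by
  intro l
  induction l with
  | nil => intro w v h; simp [pvScanB] at h
  | cons e rest ih =>
    intro w v h
    obtain ⟨we, ve⟩ := e
    simp only [pvScanB] at h
    by_cases hm : pvMatchB s pos we = true
    · rw [if_pos hm] at h
      cases h
      exact ⟨[], rest, rfl, by simp⟩
    · rw [if_neg hm] at h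
      obtain ⟨pre, post, heq, hall⟩ := ih w v h
      refine ⟨(we, ve) :: pre, post, by simp [heq], ?_⟩
      intro x hx
      rcases List.mem_cons.mp hx with hx | hx
      · subst hx; simpa using hm
      · exact hall x hx

-- B's entry scan finds nothing iff no entry matches
theorem pvScanB_eq_none_iff (s : List Char) (pos : Nat) :
    ∀ (l : List (List Char × List String)),
      pvScanB s pos l = none ↔ ∀ x ∈ l, pvMatchB s pos x.1 = false := by
  intro l
  induction l with
  | nil => simp [pvScanB]
  | cons e rest ih =>
    obtain ⟨we, ve⟩ := e
    by_cases hm : pvMatchB s pos we = true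
    · simp [pvScanB, hm]
    · simp only [pvScanB, if_neg hm, ih, List.mem_cons]
      constructor
      · intro hall x hx
        rcases hx with hx | hx
        · subst hx; simpa using hm
        · exact hall x hx
      · intro hall x hx
        exact hall x (Or.inr hx)

-- A's length scan: the first hit splits the candidate list, everything before misses the dict
theorem pvScanA_split (d : PySem.Dict (List Char) (List String)) (s : List Char) (pos : Nat) :
    ∀ (ws : List Nat) (wl : Nat) (w : List Char) (v : List String),
      pvScanA d s pos ws = some (wl, w, v) →
      w = (s.drop pos).take wl ∧ d.get? w = some v ∧
        ∃ pre post, ws = pre ++ wl :: post ∧ ∀ x ∈ pre, d.get? ((s.drop pos).take x) = none := by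
  intro ws
  induction ws with
  | nil => intro wl w v h; simp [pvScanA] at h
  | cons a rest ih =>
    intro wl w v h
    simp only [pvScanA] at h
    rcases hg : d.get? ((s.drop pos).take a) with _ | v'
    · rw [hg] at h
      obtain ⟨h1, h2, pre, post, heq, hall⟩ := ih wl w v h
      refine ⟨h1, h2, a :: pre, post, by simp [heq], ?_⟩
      intro x hx
      rcases List.mem_cons.mp hx with hx | hx
      · subst hx; exact hg
      · exact hall x hx
    · rw [hg] at h
      cases h
      exact ⟨rfl, hg, [], rest, rfl, by simp⟩

-- A's length scan finds nothing iff no candidate length hits the dict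
theorem pvScanA_eq_none_iff (d : PySem.Dict (List Char) (List String)) (s : List Char) (pos : Nat) :
    ∀ (ws : List Nat),
      pvScanA d s pos ws = none ↔ ∀ x ∈ ws, d.get? ((s.drop pos).take x) = none := by
  intro ws
  induction ws with
  | nil => simp [pvScanA]
  | cons a rest ih =>
    simp only [pvScanA]
    rcases hg : d.get? ((s.drop pos).take a) with _ | v'
    · simp only [ih, List.mem_cons]
      constructor
      · intro hall x hx
        rcases hx with hx | hx
        · subst hx; exact hg
        · exact hall x hx
      · intro hall x hx
        exact hall x (Or.inr hx)
    · simp only [List.mem_cons]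
      constructor
      · intro h; cases h
      · intro hall
        have := hall a (Or.inl rfl)
        rw [hg] at this
        cases this

-- an entry matches at pos exactly when its key length hits the dict via A's substring probe
theorem pv_match_length (d : PySem.Dict (List Char) (List String)) (hnd : d.keys.Nodup)
    (byLen : List (List Char × List String)) (hmem : ∀ e, e ∈ byLen ↔ e ∈ d.items)
    (s : List Char) (pos : Nat) (w : List Char) (v : List String)
    (he : (w, v) ∈ byLen) (hm : pvMatchB s pos w = true) :
    w ≠ [] ∧ w = (s.drop pos).take w.length ∧ w.length ≤ s.length - pos ∧
      d.get? ((s.drop pos).take w.length) = some v := by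
  simp only [pvMatchB, Bool.and_eq_true, Bool.not_eq_true'] at hm
  have hne : w ≠ [] := by simpa [List.isEmpty_iff] using hm.1
  have hpre : w <+: s.drop pos := List.isPrefixOf_iff_prefix.mp hm.2
  have htake : w = (s.drop pos).take w.length := List.prefix_iff_eq_take.mp hpre
  have hlen : w.length ≤ s.length - pos := by
    have := hpre.length_le
    simpa [List.length_drop] using this
  have hget : d.get? w = some v :=
    PySem.Dict.get?_of_mem_items d ((hmem _).mp he) hnd
  exact ⟨hne, htake, hlen, htake ▸ hget⟩

-- the scan correspondence: B's first length-sorted matching entry is exactly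
-- A's shortest matching substring length
theorem pvScan_corr (d : PySem.Dict (List Char) (List String)) (hnd : d.keys.Nodup)
    (byLen : List (List Char × List String)) (hmem : ∀ e, e ∈ byLen ↔ e ∈ d.items)
    (hpw : byLen.Pairwise (fun a b => a.1.length ≤ b.1.length))
    (s : List Char) (pos : Nat) :
    pvScanB s pos byLen
      = (pvScanA d s pos (List.range' 1 (s.length - pos))).map (fun r => (r.2.1, r.2.2)) := by
  rcases hA : pvScanA d s pos (List.range' 1 (s.length - pos)) with _ | ⟨wl, w, v⟩
  · -- A found nothing: no entry can match
    rw [pvScanA_eq_none_iff] at hA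
    simp only [Option.map_none]
    rw [pvScanB_eq_none_iff]
    rintro ⟨w, v⟩ hx
    by_contra hm
    rw [Bool.not_eq_false] at hm
    obtain ⟨hne, htake, hlen, hget⟩ := pv_match_length d hnd byLen hmem s pos w v hx hm
    have h1 : 0 < w.length := List.length_pos_iff.mpr hne
    have hr : w.length ∈ List.range' 1 (s.length - pos) := by
      rw [List.mem_range'_1]; omega
    rw [hA _ hr] at hget
    cases hget
  · -- A found the shortest hit (wl, w, v): B finds exactly (w, v)
    obtain ⟨htakeA, hgetA, preL, postL, hwsplit, hmissL⟩ := pvScanA_split d s pos _ _ _ _ hA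
    have hwlmem : wl ∈ List.range' 1 (s.length - pos) := by
      rw [hwsplit]; exact List.mem_append.mpr (Or.inr List.mem_cons_self)
    have hwlb := List.mem_range'_1.mp hwlmem
    have hwlen : w.length = wl := by
      rw [htakeA]
      simp only [List.length_take, List.length_drop]
      omega
    -- every length a matching entry can have is ≥ wl
    have hmin : ∀ (w' : List Char) (v' : List String), (w', v') ∈ byLen →
        pvMatchB s pos w' = true → wl ≤ w'.length := by
      intro w' v' he hm
      obtain ⟨hne', _, hlen', hget'⟩ := pv_match_length d hnd byLen hmem s pos w' v' he hm
      by_contra hlt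
      rw [not_le] at hlt
      have h1 : 0 < w'.length := List.length_pos_iff.mpr hne'
      have hmem' : w'.length ∈ List.range' 1 (s.length - pos) := by
        rw [List.mem_range'_1]; omega
      rw [hwsplit] at hmem'
      rcases List.mem_append.mp hmem' with h2 | h2
      · rw [hmissL _ h2] at hget'; cases hget'
      · rcases List.mem_cons.mp h2 with h2 | h2
        · omega
        · -- lengths after wl in range' are > wl
          have hpwR := @List.pairwise_lt_range' 1 (s.length - pos) 1 Nat.one_pos
          rw [hwsplit] at hpwR
          have := ((List.pairwise_append.mp hpwR).2.1)
          have := (List.pairwise_cons.mp this).1 _ h2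
          omega
    -- (w, v) itself is a matching entry
    have hwmem : (w, v) ∈ byLen := (hmem _).mpr (PySem.Dict.mem_items_of_get?_eq_some _ hgetA)
    have hwmatch : pvMatchB s pos w = true := by
      have hpre : w <+: s.drop pos := by
        rw [htakeA]; exact List.take_prefix _ _
      have hne : w ≠ [] := by
        intro h
        rw [h] at hwlen
        simp at hwlen
        omega
      simp [pvMatchB, List.isPrefixOf_iff_prefix, hpre, hne]
    -- B cannot miss
    rcases hB : pvScanB s pos byLen with _ | ⟨w', v'⟩
    · rw [pvScanB_eq_none_iff] at hB
      rw [hB _ hwmem] at hwmatch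
      cases hwmatch
    · obtain ⟨preB, postB, hsplitB, hmissB⟩ := pvScanB_split s pos byLen w' v' hB
      have hm' : pvMatchB s pos w' = true := pvScanB_match s pos byLen w' v' hB
      have he' : (w', v') ∈ byLen := by
        rw [hsplitB]; exact List.mem_append.mpr (Or.inr List.mem_cons_self)
      have hge : wl ≤ w'.length := hmin w' v' he' hm'
      -- (w, v) is not strictly before (w', v'), so w'.length ≤ w.length
      have hle : w'.length ≤ w.length := by
        rw [hsplitB] at hwmem
        rcases List.mem_append.mp hwmem with h2 | h2
        · rw [hmissB _ h2] at hwmatch; cases hwmatch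
        · rcases List.mem_cons.mp h2 with h2 | h2
          · rw [Prod.mk.injEq] at h2
            rw [h2.1]
          · rw [hsplitB] at hpw
            have := (List.pairwise_append.mp hpw).2.1
            exact (List.pairwise_cons.mp this).1 _ h2
      have hlen' : w'.length = wl := by omega
      -- same length and both prefixes at pos ⇒ same key ⇒ same value
      obtain ⟨_, htake', _, hget'⟩ := pv_match_length d hnd byLen hmem s pos w' v' he' hm'
      have hw'w : w' = w := by rw [htake', hlen', htakeA]
      have hgw' : d.get? w' = some v' := by
        rw [htake']; exact hget'
      have hv'v : v' = v := by
        rw [hw'w] at hgw'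
        exact Option.some.inj (hgw'.symm.trans hgetA)
      rw [hw'w, hv'v]
      rfl

-- the main loop invariant: A's accumulator loop equals acc ++ B's loop
theorem pvLoop_eq (d : PySem.Dict (List Char) (List String)) (hnd : d.keys.Nodup)
    (byLen : List (List Char × List String)) (hmem : ∀ e, e ∈ byLen ↔ e ∈ d.items)
    (hpw : byLen.Pairwise (fun a b => a.1.length ≤ b.1.length))
    (s : List Char)
    (H3 : ∀ pos w v, d.get? w = some v → w ≠ [] → w <+: s.drop pos → pos < s.length →
      (∀ m, 1 ≤ m → m < w.length → d.get? ((s.drop pos).take m) = none) → v.length = 3) :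
    ∀ pos acc, pvLoopA d s pos acc = acc ++ pvLoopB byLen s pos := by
  suffices H : ∀ n pos acc, s.length - pos ≤ n → pvLoopA d s pos acc = acc ++ pvLoopB byLen s pos from
    fun pos acc => H (s.length - pos) pos acc le_rfl
  intro n
  induction n with
  | zero =>
    intro pos acc hn
    have hp : ¬ pos < s.length := by omega
    rw [pvLoopA, pvLoopB]
    simp [hp]
  | succ n ih =>
    intro pos acc hn
    by_cases hp : pos < s.length
    · have hcorr := pvScan_corr d hnd byLen hmem hpw s pos
      rw [pvLoopA, pvLoopB]
      simp only [hp, dite_true]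
      split
      · rename_i wl w v hsA
        obtain ⟨htakeA, hgetA, preL, postL, hwsplit, hmissL⟩ := pvScanA_split d s pos _ _ _ _ hsA
        have hwlmem : wl ∈ List.range' 1 (s.length - pos) := by
          rw [hwsplit]; exact List.mem_append.mpr (Or.inr List.mem_cons_self)
        have hwlb := List.mem_range'_1.mp hwlmem
        have hwlen : w.length = wl := by
          rw [htakeA]
          simp only [List.length_take, List.length_drop]
          omega
        have hB : pvScanB s pos byLen = some (w, v) := by
          rw [hcorr, hsA]; rfl
        have hne : w ≠ [] := by
          intro h
          rw [h] at hwlen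
          simp at hwlen
          omega
        have hv3 : v.length = 3 := by
          apply H3 pos w v hgetA hne (htakeA ▸ List.take_prefix _ _) hp
          intro m hm1 hm2
          rw [hwlen] at hm2
          have hmmem : m ∈ List.range' 1 (s.length - pos) := by
            rw [List.mem_range'_1]; omega
          rw [hwsplit] at hmmem
          rcases List.mem_append.mp hmmem with h2 | h2
          · exact hmissL _ h2
          · rcases List.mem_cons.mp h2 with h2 | h2
            · omega
            · have hpwR := @List.pairwise_lt_range' 1 (s.length - pos) 1 Nat.one_pos
              rw [hwsplit] at hpwR
              have := (List.pairwise_append.mp hpwR).2.1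
              have := (List.pairwise_cons.mp this).1 _ h2
              omega
        obtain ⟨t, c, g, hv⟩ : ∃ t c g, v = [t, c, g] := by
          match v, hv3 with
          | [t, c, g], _ => exact ⟨t, c, g, rfl⟩
        split
        · rename_i w' v' hsB
          rw [hB] at hsB
          rw [Option.some.injEq, Prod.mk.injEq] at hsB
          obtain ⟨hw', hv'⟩ := hsB
          subst hw'; subst hv'
          rw [hwlen, ih (pos + wl) _ (by omega)]
          simp [pvTokenA, hv]
        · rename_i hsB
          rw [hsB] at hB
          cases hB
      · rename_i hsA
        have hB : pvScanB s pos byLen = none := by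
          rw [hcorr, hsA]; rfl
        split
        · rename_i w' v' hsB
          rw [hsB] at hB
          cases hB
        · exact ih (pos + 1) acc (by omega)
    · rw [pvLoopA, pvLoopB]
      simp [hp]

-- every lookup of a listed key succeeds (a dict built from a pair list contains each listed key)
theorem pv_get?_update_ne_none {κ ν : Type} [BEq κ] [LawfulBEq κ] (k : κ) :
    ∀ (ps : List (κ × ν)) (d : PySem.Dict κ ν), d.get? k ≠ none → (d.update ps).get? k ≠ none := by
  intro ps
  induction ps with
  | nil => intro d h; simpa [PySem.Dict.update] using h
  | cons q rest ih =>
    intro d h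
    have h1 : (d.update (q :: rest)) = ((d.insert q.1 q.2).update rest) := by
      simp [PySem.Dict.update]
    rw [h1]
    apply ih
    by_cases hk : k = q.1
    · subst hk
      rw [PySem.Dict.get?_insert_self]
      simp
    · rw [PySem.Dict.get?_insert_of_ne d q.2 hk]
      exact h

theorem pv_get?_ofList_ne_none {κ ν : Type} [BEq κ] [LawfulBEq κ] (ps : List (κ × ν)) :
    ∀ (p : κ × ν), p ∈ ps → (PySem.Dict.ofList ps).get? p.1 ≠ none := by
  suffices H : ∀ (ps : List (κ × ν)) (d : PySem.Dict κ ν) (p : κ × ν), p ∈ ps →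
      (d.update ps).get? p.1 ≠ none by
    intro p hp
    have := H ps PySem.Dict.empty p hp
    simpa [PySem.Dict.ofList] using this
  intro ps
  induction ps with
  | nil => intro d p hp; simp at hp
  | cons q rest ih =>
    intro d p hp
    have h1 : (d.update (q :: rest)) = ((d.insert q.1 q.2).update rest) := by
      simp [PySem.Dict.update]
    rw [h1]
    rcases List.mem_cons.mp hp with hp | hp
    · subst hp
      apply pv_get?_update_ne_none
      rw [PySem.Dict.get?_insert_self]
      simp
    · exact ih _ p hp

-- ===== VERDICT (by name: the statement is the Claim_ definition above) =====
theorem simple_tokenizer_spec : Claim_equal_simple_tokenizer := by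
  intro th_dict sentence _ hpre
  unfold Spec_simple_tokenizer simple_tokenizer simple_tokenizer_alt
  simp only []
  set d := PySem.Dict.ofList (th_dict.map (fun p => (p.1.toList, p.2))) with hd
  have hnd : d.keys.Nodup := PySem.Dict.nodup_keys_ofList _
  have hmem : ∀ e, e ∈ PySem.List.sorted d.items (fun kv => kv.1.length) false ↔ e ∈ d.items := by
    intro e; exact PySem.List.mem_sorted d.items (fun kv => kv.1.length) false e
  have hpw : (PySem.List.sorted d.items (fun kv => kv.1.length) false).Pairwise
      (fun a b => a.1.length ≤ b.1.length) := PySem.List.sorted_pairwise d.items (fun kv => kv.1.length)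
  have H3 : ∀ pos w v, d.get? w = some v → w ≠ [] → w <+: sentence.toList.drop pos →
      pos < sentence.toList.length →
      (∀ m, 1 ≤ m → m < w.length → d.get? ((sentence.toList.drop pos).take m) = none) →
      v.length = 3 := by
    intro pos w v hg hne hprefix hpos hmiss
    by_contra hne3
    have hmemi := PySem.Dict.mem_items_of_get?_eq_some _ hg
    have hsub := pv_items_ofList_subset _ hmemi
    rcases List.mem_map.mp hsub with ⟨p, hp, heq⟩
    obtain ⟨h1, h2⟩ := Prod.mk.injEq .. ▸ heq
    obtain ⟨q, hq, hqne, hqlt, hqpre⟩ :=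
      hpre p hp (by rw [h1]; exact hne) (by rw [h2]; exact hne3) pos
        (List.mem_range.mpr hpos) (by rw [h1]; exact hprefix)
    rw [h1] at hqlt
    have hq1 : 1 ≤ q.1.toList.length := List.length_pos_iff.mpr hqne
    have hqtake : (sentence.toList.drop pos).take q.1.toList.length = q.1.toList :=
      (List.prefix_iff_eq_take.mp hqpre).symm
    have hqnone := hmiss q.1.toList.length hq1 hqlt
    rw [hqtake] at hqnone
    have hqsome := pv_get?_ofList_ne_none (th_dict.map (fun p => (p.1.toList, p.2)))
      (q.1.toList, q.2) (List.mem_map_of_mem hq)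
    exact hqsome hqnone
  exact (pvLoop_eq d hnd _ hmem hpw sentence.toList H3 0 []).trans (by simp)
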